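-- pv_equiv track=rewrite | github.com/migueangel1228/University | AGRA_2/PreParcial2/punto4-mt02-2025-1.py | bfsAux
-- ===== SOURCE A (Python) =====
-- from collections import deque
--
-- def bfsAux(G, vis, i, bridgesSet):
--     vis[i] = True
--     q = deque()
--     q.append(i)
--     estacionPrincipal = i
--
--     while len(q) > 0:
--         u = q.popleft()
--         for v, p in G[u]:
--             # Verificar si la arista es un puente
--             if not vis[v] and (u, v) not in bridgesSet:
--                 vis[v] = True
--                 q.append(v)
--                 if estacionPrincipal < v:
--                     estacionPrincipal = v
--
--     return estacionPrincipal
-- ===== SOURCE B (Python) =====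
-- def bfsAux(G, vis, i, bridgesSet):
--     # Iterative depth-first search with an explicit (node, next-edge-index) frame
--     # stack instead of A's FIFO queue + inner for-loop; visits the same non-bridge
--     # reachable nodes (mutating vis identically) and returns the max index seen.
--     vis[i] = True
--     best = i
--     stack = [(i, 0)]
--     while stack:
--         u, k = stack.pop()
--         adjacency = G[u]
--         if k < len(adjacency):
--             stack.append((u, k + 1))
--             v, p = adjacency[k]
--             if not vis[v] and (u, v) not in bridgesSet:
--                 vis[v] = True
--                 if best < v:
--                     best = v
--                 stack.append((v, 0))
--     return best
-- ===== Notes on version B (the rewrite author's own statement) =====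
-- stated objective: alternative
-- what changed: Replaces the FIFO-queue BFS with nested for-loop by an iterative depth-first search over an explicit (node, next-edge-index) frame stack that examines one edge per iteration; the reachable set, vis mutation and max-index result are identical.
import Mathlib
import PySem

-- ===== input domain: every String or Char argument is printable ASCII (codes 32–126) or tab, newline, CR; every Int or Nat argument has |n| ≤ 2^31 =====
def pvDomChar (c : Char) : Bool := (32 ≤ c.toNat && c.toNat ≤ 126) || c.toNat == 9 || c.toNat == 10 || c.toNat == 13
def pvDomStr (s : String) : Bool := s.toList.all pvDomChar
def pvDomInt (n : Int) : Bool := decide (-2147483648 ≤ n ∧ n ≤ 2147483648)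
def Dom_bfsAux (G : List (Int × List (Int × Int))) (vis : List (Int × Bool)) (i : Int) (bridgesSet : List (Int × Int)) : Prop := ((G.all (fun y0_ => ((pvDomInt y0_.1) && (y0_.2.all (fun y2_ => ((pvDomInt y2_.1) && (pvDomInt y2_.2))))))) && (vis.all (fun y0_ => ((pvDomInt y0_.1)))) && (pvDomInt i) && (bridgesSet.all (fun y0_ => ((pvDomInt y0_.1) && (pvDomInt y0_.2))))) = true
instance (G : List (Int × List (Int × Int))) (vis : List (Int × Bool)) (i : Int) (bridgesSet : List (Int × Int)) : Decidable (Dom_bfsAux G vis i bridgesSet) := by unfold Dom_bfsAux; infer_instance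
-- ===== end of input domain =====

-- B replaces A's FIFO-queue BFS by an iterative DFS over (node, next-edge-index) frames;
-- both mutate the Python vis argument identically, and the theorems are about the return value.


-- G[u] (the graph dict lookup; [] stands in for the KeyError case, which Pre_ excludes)
def pvAdj (G : List (Int × List (Int × Int))) (u : Int) : List (Int × Int) :=
  (PySem.Dict.mk G).getD u []

-- fuel scaffolding (the Python loops have no fuel; these bounds are proved sufficient below)
def pvNodes (G : List (Int × List (Int × Int))) (i : Int) : List Int :=
  i :: G.flatMap (fun e => e.2.map Prod.fst)
def pvMaxAdj (G : List (Int × List (Int × Int))) : Nat :=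
  (G.map (fun e => e.2.length)).foldr Nat.max 0
def pvW (G : List (Int × List (Int × Int))) : Nat := pvMaxAdj G + 1

-- ===== PORT A =====
-- body of A's inner `for v, p in G[u]` loop; state = (vis, q, estacionPrincipal)
def pvStepA (bridgesSet : List (Int × Int)) (u : Int)
    (st : PySem.Dict Int Bool × List Int × Int) (vp : Int × Int) :
    PySem.Dict Int Bool × List Int × Int :=
  if !(st.1.getD vp.1 false) && !(bridgesSet.contains (u, vp.1)) then
    (st.1.insert vp.1 true, st.2.1 ++ [vp.1], if st.2.2 < vp.1 then vp.1 else st.2.2)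
  else st

-- A's `while len(q) > 0` loop
def pvLoopA (G : List (Int × List (Int × Int))) (bridgesSet : List (Int × Int)) :
    Nat → List Int → PySem.Dict Int Bool → Int → Int
  | 0, _, _, best => best
  | _ + 1, [], _, best => best
  | fuel + 1, u :: rest, vis, best =>
    let st := (pvAdj G u).foldl (pvStepA bridgesSet u) (vis, rest, best)
    pvLoopA G bridgesSet fuel st.2.1 st.1 st.2.2

def pvFuelA (G : List (Int × List (Int × Int))) (i : Int) : Nat := (pvNodes G i).length + 2

def bfsAux (G : List (Int × List (Int × Int))) (vis : List (Int × Bool)) (i : Int) (bridgesSet : List (Int × Int)) : Int :=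
  pvLoopA G bridgesSet (pvFuelA G i) [i] ((PySem.Dict.mk vis).insert i true) i

-- ===== PORT B =====
-- B's `while stack` loop; each frame is (u, k) = node and index of its next edge
def pvLoopB (G : List (Int × List (Int × Int))) (bridgesSet : List (Int × Int)) :
    Nat → List (Int × Nat) → PySem.Dict Int Bool → Int → Int
  | 0, _, _, best => best
  | _ + 1, [], _, best => best
  | fuel + 1, (u, k) :: fs, vis, best =>
    let adjacency := pvAdj G u
    if h : k < adjacency.length then
      let v := (adjacency[k]).1
      if !(vis.getD v false) && !(bridgesSet.contains (u, v)) then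
        pvLoopB G bridgesSet fuel ((v, 0) :: (u, k + 1) :: fs) (vis.insert v true)
          (if best < v then v else best)
      else
        pvLoopB G bridgesSet fuel ((u, k + 1) :: fs) vis best
    else
      pvLoopB G bridgesSet fuel fs vis best

def pvFuelB (G : List (Int × List (Int × Int))) (i : Int) : Nat :=
  ((pvNodes G i).length + 1) * (pvW G + 1) + pvW G + 1

def bfsAux_alt (G : List (Int × List (Int × Int))) (vis : List (Int × Bool)) (i : Int) (bridgesSet : List (Int × Int)) : Int :=
  pvLoopB G bridgesSet (pvFuelB G i) [(i, 0)] ((PySem.Dict.mk vis).insert i true) i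

-- ===== PRECONDITION & SPEC =====
-- The set of nodes the search examines, computed as a plain reachable-set saturation
-- (independent of either port's queue/stack traversal): repeatedly add every target of a
-- non-bridge edge from an already-collected node that is still unvisited in vis.
def pvSweep (G : List (Int × List (Int × Int))) (bs : List (Int × Int))
    (vis : List (Int × Bool)) (i : Int) (S : List Int) : List Int :=
  S.foldl (fun acc u =>
    (pvAdj G u).foldl (fun acc vp =>
      if !(((PySem.Dict.mk vis).insert i true).getD vp.1 false) && !(bs.contains (u, vp.1)) &&
          !(acc.contains vp.1) then
        acc ++ [vp.1]
      else acc) acc) S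

def pvIterSweep (G : List (Int × List (Int × Int))) (bs : List (Int × Int))
    (vis : List (Int × Bool)) (i : Int) : Nat → List Int → List Int
  | 0, S => S
  | n + 1, S => pvIterSweep G bs vis i n (pvSweep G bs vis i S)

def pvVisited (G : List (Int × List (Int × Int))) (bs : List (Int × Int))
    (vis : List (Int × Bool)) (i : Int) : List Int :=
  pvIterSweep G bs vis i ((pvNodes G i).length + 1) [i]

-- Pre_ is exactly crash-freedom: Python A (and B) raises KeyError iff some examined node
-- is missing from G or some examined neighbour is missing from vis (the start node i is
-- inserted into vis before any read); both programs examine the same nodes, so they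
-- return normally on exactly the inputs admitted here.  (The equality of the two ports
-- below is in fact proved on all of Dom_; Pre_ only delimits where the ports are exact
-- transcriptions of the Python programs, which raise outside it.)
def Pre_bfsAux (G : List (Int × List (Int × Int))) (vis : List (Int × Bool)) (i : Int) (bridgesSet : List (Int × Int)) : Prop :=
  ∀ u ∈ pvVisited G bridgesSet vis i,
    u ∈ G.map Prod.fst ∧ ∀ vp ∈ pvAdj G u, vp.1 ∈ vis.map Prod.fst ∨ vp.1 = i
instance (G : List (Int × List (Int × Int))) (vis : List (Int × Bool)) (i : Int) (bridgesSet : List (Int × Int)) : Decidable (Pre_bfsAux G vis i bridgesSet) := by unfold Pre_bfsAux; infer_instance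

def pvWitness_bfsAux : (List (Int × List (Int × Int))) × (List (Int × Bool)) × Int × (List (Int × Int)) :=
  ([(0, [(1, 7)]), (1, [(0, 7), (2, 1)]), (2, [])], [(0, false), (1, false), (2, false)], 0, [(1, 2)])

def Spec_bfsAux (G : List (Int × List (Int × Int))) (vis : List (Int × Bool)) (i : Int) (bridgesSet : List (Int × Int)) (out : Int) : Prop := out = bfsAux_alt G vis i bridgesSet
instance (G : List (Int × List (Int × Int))) (vis : List (Int × Bool)) (i : Int) (bridgesSet : List (Int × Int)) (out : Int) : Decidable (Spec_bfsAux G vis i bridgesSet out) := by unfold Spec_bfsAux; infer_instance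

-- ===== CLAIM (what is proved, stated in full; the proofs are below) =====
def Claim_equal_bfsAux : Prop := ∀ (G : List (Int × List (Int × Int))) (vis : List (Int × Bool)) (i : Int) (bridgesSet : List (Int × Int)), Dom_bfsAux G vis i bridgesSet → Pre_bfsAux G vis i bridgesSet → Spec_bfsAux G vis i bridgesSet (bfsAux G vis i bridgesSet)

-- ===== LEMMAS AND PROOFS =====

-- `x` is still unvisited
def pvUnm (vis : PySem.Dict Int Bool) (x : Int) : Prop := vis.getD x false = false

-- a usable (non-bridge) edge of the graph
def pvEdge (G : List (Int × List (Int × Int))) (bs : List (Int × Int)) (u v : Int) : Prop :=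
  (∃ p, (v, p) ∈ pvAdj G u) ∧ (u, v) ∉ bs

-- nonempty usable path from x to w all of whose nodes after x are unvisited in vis
inductive pvReach (G : List (Int × List (Int × Int))) (bs : List (Int × Int))
    (vis : PySem.Dict Int Bool) : Int → Int → Prop
  | single {x w : Int} : pvEdge G bs x w → pvUnm vis w → pvReach G bs vis x w
  | cons {x y w : Int} : pvEdge G bs x y → pvUnm vis y → pvReach G bs vis y w → pvReach G bs vis x w

-- frame-relative reachability: first step uses an edge at index ≥ k of u's adjacency
def pvReachF (G : List (Int × List (Int × Int))) (bs : List (Int × Int))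
    (vis : PySem.Dict Int Bool) (u : Int) (k : Nat) (w : Int) : Prop :=
  ∃ x p, (x, p) ∈ (pvAdj G u).drop k ∧ (u, x) ∉ bs ∧ pvUnm vis x ∧
    (x = w ∨ pvReach G bs vis x w)

-- number of unvisited candidate nodes (termination potential)
def pvCnt (G : List (Int × List (Int × Int))) (i : Int) (vis : PySem.Dict Int Bool) : Nat :=
  ((pvNodes G i).filter (fun v => !(vis.getD v false))).length

def pvWeight (G : List (Int × List (Int × Int))) (fs : List (Int × Nat)) : Nat :=
  (fs.map (fun f => 1 + ((pvAdj G f.1).length - f.2))).sum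
def pvMB (G : List (Int × List (Int × Int))) (i : Int) (vis : PySem.Dict Int Bool)
    (fs : List (Int × Nat)) : Nat :=
  pvCnt G i vis * (pvW G + 1) + pvWeight G fs

theorem pvUnm_insert (vis : PySem.Dict Int Bool) (v x : Int) :
    pvUnm (vis.insert v true) x ↔ x ≠ v ∧ pvUnm vis x := by
  unfold pvUnm
  rw [PySem.Dict.getD_insert]
  by_cases h : x = v <;> simp [h]

theorem pvReach_anti (G : List (Int × List (Int × Int))) (bs : List (Int × Int))
    (vis vis' : PySem.Dict Int Bool) (h : ∀ x, pvUnm vis' x → pvUnm vis x)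
    {a b : Int} (hr : pvReach G bs vis' a b) : pvReach G bs vis a b := by
  induction hr with
  | single he hu => exact pvReach.single he (h _ hu)
  | cons he hu _ ih => exact pvReach.cons he (h _ hu) ih

theorem pvReach_split (G : List (Int × List (Int × Int))) (bs : List (Int × Int))
    (vis : PySem.Dict Int Bool) (v : Int) (hv : pvUnm vis v) {x w : Int}
    (h : pvReach G bs vis x w) :
    w = v ∨ pvReach G bs (vis.insert v true) x w ∨ pvReach G bs (vis.insert v true) v w := by
  induction h with
  | @single x w he hu =>
    by_cases hwv : w = v
    · exact Or.inl hwv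
    · exact Or.inr (Or.inl (pvReach.single he ((pvUnm_insert vis v w).2 ⟨hwv, hu⟩)))
  | @cons x y w he hu hr ih =>
    by_cases hyv : y = v
    · rcases ih with h1 | h2 | h3
      · exact Or.inl h1
      · exact Or.inr (Or.inr (hyv ▸ h2))
      · exact Or.inr (Or.inr h3)
    · rcases ih with h1 | h2 | h3
      · exact Or.inl h1
      · exact Or.inr (Or.inl (pvReach.cons he ((pvUnm_insert vis v y).2 ⟨hyv, hu⟩) h2))
      · exact Or.inr (Or.inr h3)

theorem pvReachF_zero (G : List (Int × List (Int × Int))) (bs : List (Int × Int))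
    (vis : PySem.Dict Int Bool) (u w : Int) :
    pvReachF G bs vis u 0 w ↔ pvReach G bs vis u w := by
  constructor
  · rintro ⟨x, p, hm, hb, hx, hxw | hxw⟩
    · exact hxw ▸ pvReach.single ⟨⟨p, by simpa using hm⟩, hb⟩ hx
    · exact pvReach.cons ⟨⟨p, by simpa using hm⟩, hb⟩ hx hxw
  · intro h
    cases h with
    | single he hu =>
      obtain ⟨⟨p, hp⟩, hb⟩ := he
      exact ⟨w, p, by simpa using hp, hb, hu, Or.inl rfl⟩
    | @cons x y w he hu hr =>
      obtain ⟨⟨p, hp⟩, hb⟩ := he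
      exact ⟨y, p, by simpa using hp, hb, hu, Or.inr hr⟩

theorem pvReachF_anti (G : List (Int × List (Int × Int))) (bs : List (Int × Int))
    (vis vis' : PySem.Dict Int Bool) (h : ∀ x, pvUnm vis' x → pvUnm vis x)
    {u : Int} {k : Nat} {w : Int} (hr : pvReachF G bs vis' u k w) : pvReachF G bs vis u k w := by
  obtain ⟨x, p, hm, hb, hx, hxw⟩ := hr
  refine ⟨x, p, hm, hb, h _ hx, ?_⟩
  rcases hxw with h1 | h2
  · exact Or.inl h1
  · exact Or.inr (pvReach_anti G bs vis vis' h h2)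

theorem pvReachF_insert (G : List (Int × List (Int × Int))) (bs : List (Int × Int))
    (vis : PySem.Dict Int Bool) (v : Int) (hv : pvUnm vis v) {u : Int} {k : Nat} {w : Int}
    (h : pvReachF G bs vis u k w) :
    w = v ∨ pvReachF G bs (vis.insert v true) u k w ∨
      pvReachF G bs (vis.insert v true) v 0 w := by
  obtain ⟨x, p, hm, hb, hx, hxw⟩ := h
  by_cases hxv : x = v
  · subst hxv
    rcases hxw with h1 | h2
    · exact Or.inl h1.symm
    · rcases pvReach_split G bs vis x hv h2 with h3 | h4 | h5
      · exact Or.inl h3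
      · exact Or.inr (Or.inr ((pvReachF_zero _ _ _ _ _).2 h4))
      · exact Or.inr (Or.inr ((pvReachF_zero _ _ _ _ _).2 h5))
  · have hx' : pvUnm (vis.insert v true) x := (pvUnm_insert vis v x).2 ⟨hxv, hx⟩
    rcases hxw with h1 | h2
    · exact Or.inr (Or.inl ⟨x, p, hm, hb, hx', Or.inl h1⟩)
    · rcases pvReach_split G bs vis v hv h2 with h3 | h4 | h5
      · exact Or.inl h3
      · exact Or.inr (Or.inl ⟨x, p, hm, hb, hx', Or.inr h4⟩)
      · exact Or.inr (Or.inr ((pvReachF_zero _ _ _ _ _).2 h5))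

theorem pvLengthFilterMono {α : Type} (l : List α) (p q : α → Bool)
    (h : ∀ a ∈ l, q a = true → p a = true) : (l.filter q).length ≤ (l.filter p).length := by
  induction l with
  | nil => simp
  | cons a l ih =>
    have ih' := ih (fun b hb h2 => h b (List.mem_cons_of_mem a hb) h2)
    by_cases hq : q a = true
    · have hp := h a (List.mem_cons_self) hq
      simp only [List.filter_cons, hq, hp, if_true, List.length_cons]
      omega
    · rw [Bool.not_eq_true] at hq
      by_cases hp : p a = true
      · simp only [List.filter_cons, hq, hp, if_true, Bool.false_eq_true, if_false, List.length_cons]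
        omega
      · rw [Bool.not_eq_true] at hp
        simp only [List.filter_cons, hq, hp, Bool.false_eq_true, if_false]
        omega

theorem pvLengthFilterLt {α : Type} (l : List α) (p q : α → Bool)
    (h : ∀ a ∈ l, q a = true → p a = true) (a : α) (ha : a ∈ l)
    (hp : p a = true) (hq : q a = false) : (l.filter q).length < (l.filter p).length := by
  induction l with
  | nil => simp at ha
  | cons b l ih =>
    rcases List.mem_cons.1 ha with rfl | hb
    · have hmono := pvLengthFilterMono l p q (fun c hc h2 => h c (List.mem_cons_of_mem _ hc) h2)
      simp only [List.filter_cons, hp, hq, if_true, Bool.false_eq_true, if_false, List.length_cons]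
      omega
    · have ih' := ih (fun c hc h2 => h c (List.mem_cons_of_mem _ hc) h2) hb
      by_cases hqb : q b = true
      · have hpb := h b (List.mem_cons_self) hqb
        simp only [List.filter_cons, hqb, hpb, if_true, List.length_cons]
        omega
      · rw [Bool.not_eq_true] at hqb
        by_cases hpb : p b = true
        · simp only [List.filter_cons, hqb, hpb, if_true, Bool.false_eq_true, if_false, List.length_cons]
          omega
        · rw [Bool.not_eq_true] at hpb
          simp only [List.filter_cons, hqb, hpb, Bool.false_eq_true, if_false]
          omega

theorem pvCnt_insert_lt (G : List (Int × List (Int × Int))) (i : Int)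
    (vis : PySem.Dict Int Bool) (v : Int) (hv : v ∈ pvNodes G i) (hu : pvUnm vis v) :
    pvCnt G i (vis.insert v true) < pvCnt G i vis := by
  unfold pvCnt
  refine pvLengthFilterLt _ _ _ ?_ v hv ?_ ?_
  · intro a _ h2
    simp only [Bool.not_eq_true'] at h2 ⊢
    exact (pvUnm_insert vis v a).1 h2 |>.2
  · simpa using hu
  · simp

theorem pvCnt_le (G : List (Int × List (Int × Int))) (i : Int) (vis : PySem.Dict Int Bool) :
    pvCnt G i vis ≤ (pvNodes G i).length := by
  unfold pvCnt
  exact List.length_filter_le _ _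

theorem pvAdj_cons (e : Int × List (Int × Int)) (G : List (Int × List (Int × Int))) (u : Int) :
    pvAdj (e :: G) u = if e.1 == u then e.2 else pvAdj G u := by
  unfold pvAdj
  rw [PySem.Dict.getD_eq_get?_getD, PySem.Dict.get?_mk_cons]
  split <;> simp [PySem.Dict.getD_eq_get?_getD]

theorem pvMaxAdj_mem (G : List (Int × List (Int × Int))) (e : Int × List (Int × Int))
    (he : e ∈ G) : e.2.length ≤ pvMaxAdj G := by
  induction G with
  | nil => simp at he
  | cons g G ih =>
    have hstep : pvMaxAdj (g :: G) = Nat.max g.2.length (pvMaxAdj G) := by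
      simp [pvMaxAdj]
    rcases List.mem_cons.1 he with rfl | hmem
    · rw [hstep]; exact Nat.le_max_left _ _
    · rw [hstep]; exact le_trans (ih hmem) (Nat.le_max_right _ _)

theorem pvAdj_cases (G : List (Int × List (Int × Int))) (u : Int) :
    pvAdj G u = [] ∨ ∃ e ∈ G, pvAdj G u = e.2 := by
  induction G with
  | nil => exact Or.inl rfl
  | cons e G ih =>
    rw [pvAdj_cons]
    by_cases h : e.1 == u
    · simp only [h, if_true]
      exact Or.inr ⟨e, List.mem_cons_self, rfl⟩
    · simp only [h, Bool.false_eq_true, if_false]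
      rcases ih with h1 | ⟨e', he', h2⟩
      · exact Or.inl h1
      · exact Or.inr ⟨e', List.mem_cons_of_mem _ he', h2⟩

theorem pvAdj_sub (G : List (Int × List (Int × Int))) (i u : Int) {vp : Int × Int}
    (h : vp ∈ pvAdj G u) : vp.1 ∈ pvNodes G i := by
  rcases pvAdj_cases G u with h1 | ⟨e, he, h2⟩
  · rw [h1] at h; simp at h
  · rw [h2] at h
    unfold pvNodes
    refine List.mem_cons_of_mem _ ?_
    rw [List.mem_flatMap]
    exact ⟨e, he, List.mem_map.2 ⟨vp, h, rfl⟩⟩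

theorem pvAdj_len (G : List (Int × List (Int × Int))) (u : Int) :
    (pvAdj G u).length ≤ pvMaxAdj G := by
  rcases pvAdj_cases G u with h1 | ⟨e, he, h2⟩
  · rw [h1]; simp
  · rw [h2]; exact pvMaxAdj_mem G e he

-- ---- A-side fold lemmas ----

theorem pvStepA_eq (bs : List (Int × Int)) (u : Int)
    (st : PySem.Dict Int Bool × List Int × Int) (vp : Int × Int) :
    pvStepA bs u st vp =
      if st.1.getD vp.1 false = false ∧ (u, vp.1) ∉ bs then
        (st.1.insert vp.1 true, st.2.1 ++ [vp.1], if st.2.2 < vp.1 then vp.1 else st.2.2)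
      else st := by
  by_cases h : st.1.getD vp.1 false = false ∧ (u, vp.1) ∉ bs
  · rw [if_pos h]; unfold pvStepA; rw [if_pos (by simpa using h)]
  · rw [if_neg h]; unfold pvStepA; rw [if_neg (by simpa using h)]



theorem pvFoldA_best (G : List (Int × List (Int × Int))) (bs : List (Int × Int)) (u : Int)
    (l : List (Int × Int)) (st : PySem.Dict Int Bool × List Int × Int) :
    st.2.2 ≤ (l.foldl (pvStepA bs u) st).2.2 := by
  induction l generalizing st with
  | nil => simp
  | cons a l ih =>
    simp only [List.foldl_cons]
    rw [pvStepA_eq]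
    by_cases hc : st.1.getD a.1 false = false ∧ (u, a.1) ∉ bs
    · rw [if_pos hc]
      refine le_trans ?_ (ih _)
      show st.2.2 ≤ if st.2.2 < a.1 then a.1 else st.2.2
      split_ifs with h2 <;> omega
    · rw [if_neg hc]
      exact ih st

theorem pvFoldA_unm (G : List (Int × List (Int × Int))) (bs : List (Int × Int)) (u : Int)
    (l : List (Int × Int)) (st : PySem.Dict Int Bool × List Int × Int) (x : Int)
    (h : pvUnm (l.foldl (pvStepA bs u) st).1 x) : pvUnm st.1 x := by
  induction l generalizing st with
  | nil => simpa using h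
  | cons a l ih =>
    simp only [List.foldl_cons] at h
    rw [pvStepA_eq] at h
    by_cases hc : st.1.getD a.1 false = false ∧ (u, a.1) ∉ bs
    · rw [if_pos hc] at h
      exact ((pvUnm_insert _ _ _).1 (ih _ h)).2
    · rw [if_neg hc] at h
      exact ih _ h

theorem pvFoldA_transfer (G : List (Int × List (Int × Int))) (bs : List (Int × Int)) (u : Int)
    (l : List (Int × Int)) (st : PySem.Dict Int Bool × List Int × Int) (s w : Int)
    (hs : s ∈ st.2.1) (hr : pvReach G bs st.1 s w) :
    w ≤ (l.foldl (pvStepA bs u) st).2.2 ∨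
      ∃ t ∈ (l.foldl (pvStepA bs u) st).2.1, pvReach G bs (l.foldl (pvStepA bs u) st).1 t w := by
  induction l generalizing st s with
  | nil => exact Or.inr ⟨s, by simpa using hs, by simpa using hr⟩
  | cons a l ih =>
    simp only [List.foldl_cons]
    rw [pvStepA_eq]
    by_cases hc : st.1.getD a.1 false = false ∧ (u, a.1) ∉ bs
    · rw [if_pos hc]
      rcases pvReach_split G bs st.1 a.1 hc.1 hr with h1 | h2 | h3
      · refine Or.inl ?_
        rw [h1]
        refine le_trans ?_ (pvFoldA_best G bs u l _)
        show a.1 ≤ if st.2.2 < a.1 then a.1 else st.2.2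
        split_ifs with h2 <;> omega
      · exact ih _ s (List.mem_append_left _ hs) h2
      · exact ih _ a.1 (List.mem_append_right _ (List.mem_singleton.2 rfl)) h3
    · rw [if_neg hc]
      exact ih _ s hs hr

theorem pvFoldA_head (G : List (Int × List (Int × Int))) (bs : List (Int × Int)) (u : Int)
    (l : List (Int × Int)) (st : PySem.Dict Int Bool × List Int × Int) (x : Int) (px : Int) (w : Int)
    (hm : (x, px) ∈ l) (hb : (u, x) ∉ bs) (hx : pvUnm st.1 x)
    (hw : x = w ∨ pvReach G bs st.1 x w) :
    w ≤ (l.foldl (pvStepA bs u) st).2.2 ∨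
      ∃ t ∈ (l.foldl (pvStepA bs u) st).2.1, pvReach G bs (l.foldl (pvStepA bs u) st).1 t w := by
  induction l generalizing st x px with
  | nil => simp at hm
  | cons a l ih =>
    simp only [List.foldl_cons]
    rw [pvStepA_eq]
    by_cases hc : st.1.getD a.1 false = false ∧ (u, a.1) ∉ bs
    · rw [if_pos hc]
      by_cases hxa : x = a.1
      · rcases hw with h1 | hr
        · refine Or.inl ?_
          rw [← h1, hxa]
          refine le_trans ?_ (pvFoldA_best G bs u l _)
          show a.1 ≤ if st.2.2 < a.1 then a.1 else st.2.2
          split_ifs with h2 <;> omega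
        · rw [hxa] at hr
          rcases pvReach_split G bs st.1 a.1 hc.1 hr with h1 | h2 | h3
          · refine Or.inl ?_
            rw [h1]
            refine le_trans ?_ (pvFoldA_best G bs u l _)
            show a.1 ≤ if st.2.2 < a.1 then a.1 else st.2.2
            split_ifs with h2 <;> omega
          · exact pvFoldA_transfer G bs u l _ a.1 w
              (List.mem_append_right _ (List.mem_singleton.2 rfl)) h2
          · exact pvFoldA_transfer G bs u l _ a.1 w
              (List.mem_append_right _ (List.mem_singleton.2 rfl)) h3
      · have hx1 : pvUnm (st.1.insert a.1 true) x := (pvUnm_insert _ _ _).2 ⟨hxa, hx⟩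
        rcases List.mem_cons.1 hm with heq | hml
        · exact absurd (congrArg Prod.fst heq) hxa
        · rcases hw with h1 | hr
          · exact ih _ x px hml hb hx1 (Or.inl h1)
          · rcases pvReach_split G bs st.1 a.1 hc.1 hr with h1 | h2 | h3
            · refine Or.inl ?_
              rw [h1]
              refine le_trans ?_ (pvFoldA_best G bs u l _)
              show a.1 ≤ if st.2.2 < a.1 then a.1 else st.2.2
              split_ifs with h2 <;> omega
            · exact ih _ x px hml hb hx1 (Or.inr h2)
            · exact pvFoldA_transfer G bs u l _ a.1 w
                (List.mem_append_right _ (List.mem_singleton.2 rfl)) h3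
    · rw [if_neg hc]
      rcases List.mem_cons.1 hm with heq | hml
      · exfalso
        apply hc
        have h1 : a.1 = x := (congrArg Prod.fst heq).symm
        rw [h1]
        exact ⟨hx, hb⟩
      · exact ih _ x px hml hb hx hw

theorem pvFoldA_measure (G : List (Int × List (Int × Int))) (bs : List (Int × Int)) (i u : Int)
    (l : List (Int × Int)) (st : PySem.Dict Int Bool × List Int × Int)
    (hl : ∀ vp ∈ l, vp.1 ∈ pvNodes G i) :
    pvCnt G i (l.foldl (pvStepA bs u) st).1 + (l.foldl (pvStepA bs u) st).2.1.length ≤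
      pvCnt G i st.1 + st.2.1.length := by
  induction l generalizing st with
  | nil => simp
  | cons a l ih =>
    simp only [List.foldl_cons]
    rw [pvStepA_eq]
    by_cases hc : st.1.getD a.1 false = false ∧ (u, a.1) ∉ bs
    · rw [if_pos hc]
      have h1 : pvCnt G i (st.1.insert a.1 true) < pvCnt G i st.1 :=
        pvCnt_insert_lt G i st.1 a.1 (hl a List.mem_cons_self) hc.1
      have h2 := ih (st.1.insert a.1 true, st.2.1 ++ [a.1],
        if st.2.2 < a.1 then a.1 else st.2.2) (fun vp hvp => hl vp (List.mem_cons_of_mem _ hvp))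
      simp only [List.length_append, List.length_cons, List.length_nil] at h2
      omega
    · rw [if_neg hc]
      exact ih st (fun vp hvp => hl vp (List.mem_cons_of_mem _ hvp))

theorem pvFoldA_bestSound (G : List (Int × List (Int × Int))) (bs : List (Int × Int)) (u : Int)
    (l : List (Int × Int)) (st : PySem.Dict Int Bool × List Int × Int) :
    (l.foldl (pvStepA bs u) st).2.2 = st.2.2 ∨
      ∃ v, pvUnm st.1 v ∧ (∃ p, (v, p) ∈ l) ∧ (u, v) ∉ bs ∧ (l.foldl (pvStepA bs u) st).2.2 = v := by
  induction l generalizing st with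
  | nil => exact Or.inl rfl
  | cons a l ih =>
    simp only [List.foldl_cons]
    rw [pvStepA_eq]
    by_cases hc : st.1.getD a.1 false = false ∧ (u, a.1) ∉ bs
    · rw [if_pos hc]
      rcases ih (st.1.insert a.1 true, st.2.1 ++ [a.1],
        if st.2.2 < a.1 then a.1 else st.2.2) with h1 | ⟨v, hunm, ⟨p, hp⟩, hnb, heq⟩
      · by_cases hlt : st.2.2 < a.1
        · refine Or.inr ⟨a.1, hc.1, ⟨a.2, by simp⟩, hc.2, ?_⟩
          rw [h1]; show (if st.2.2 < a.1 then a.1 else st.2.2) = a.1; rw [if_pos hlt]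
        · refine Or.inl ?_
          rw [h1]; show (if st.2.2 < a.1 then a.1 else st.2.2) = st.2.2; rw [if_neg hlt]
      · exact Or.inr ⟨v, ((pvUnm_insert _ _ _).1 hunm).2, ⟨p, List.mem_cons_of_mem _ hp⟩,
          hnb, heq⟩
    · rw [if_neg hc]
      rcases ih st with h1 | ⟨v, hunm, ⟨p, hp⟩, hnb, heq⟩
      · exact Or.inl h1
      · exact Or.inr ⟨v, hunm, ⟨p, List.mem_cons_of_mem _ hp⟩, hnb, heq⟩

theorem pvFoldA_qSound (G : List (Int × List (Int × Int))) (bs : List (Int × Int)) (u : Int)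
    (l : List (Int × Int)) (st : PySem.Dict Int Bool × List Int × Int) (t : Int)
    (ht : t ∈ (l.foldl (pvStepA bs u) st).2.1) :
    t ∈ st.2.1 ∨ (pvUnm st.1 t ∧ (∃ p, (t, p) ∈ l) ∧ (u, t) ∉ bs) := by
  induction l generalizing st with
  | nil => exact Or.inl (by simpa using ht)
  | cons a l ih =>
    simp only [List.foldl_cons] at ht
    rw [pvStepA_eq] at ht
    by_cases hc : st.1.getD a.1 false = false ∧ (u, a.1) ∉ bs
    · rw [if_pos hc] at ht
      rcases ih _ ht with h1 | ⟨hunm, ⟨p, hp⟩, hnb⟩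
      · rcases List.mem_append.1 h1 with h2 | h2
        · exact Or.inl h2
        · have h3 : t = a.1 := List.mem_singleton.1 h2
          subst h3
          exact Or.inr ⟨hc.1, ⟨a.2, by simp⟩, hc.2⟩
      · exact Or.inr ⟨((pvUnm_insert _ _ _).1 hunm).2, ⟨p, List.mem_cons_of_mem _ hp⟩, hnb⟩
    · rw [if_neg hc] at ht
      rcases ih _ ht with h1 | ⟨hunm, ⟨p, hp⟩, hnb⟩
      · exact Or.inl h1
      · exact Or.inr ⟨hunm, ⟨p, List.mem_cons_of_mem _ hp⟩, hnb⟩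

-- ---- A-side loop lemmas ----

theorem pvLoopA_best (G : List (Int × List (Int × Int))) (bs : List (Int × Int))
    (fuel : Nat) (q : List Int) (vis : PySem.Dict Int Bool) (best : Int) :
    best ≤ pvLoopA G bs fuel q vis best := by
  induction fuel generalizing q vis best with
  | zero => exact le_refl _
  | succ fuel ih =>
    cases q with
    | nil => exact le_refl _
    | cons u rest =>
      simp only [pvLoopA]
      exact le_trans (pvFoldA_best G bs u (pvAdj G u) (vis, rest, best)) (ih _ _ _)

theorem pvLoopA_complete (G : List (Int × List (Int × Int))) (bs : List (Int × Int)) (i : Int)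
    (fuel : Nat) (q : List Int) (vis : PySem.Dict Int Bool) (best : Int)
    (hfuel : pvCnt G i vis + q.length < fuel) (s : Int) (hs : s ∈ q) (w : Int)
    (hr : pvReach G bs vis s w) : w ≤ pvLoopA G bs fuel q vis best := by
  induction fuel generalizing q vis best s with
  | zero => omega
  | succ fuel ih =>
    cases q with
    | nil => simp at hs
    | cons u rest =>
      simp only [pvLoopA]
      have hsub : ∀ vp ∈ pvAdj G u, vp.1 ∈ pvNodes G i := fun vp h => pvAdj_sub G i u h
      have hm : pvCnt G i (List.foldl (pvStepA bs u) (vis, rest, best) (pvAdj G u)).1 +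
          (List.foldl (pvStepA bs u) (vis, rest, best) (pvAdj G u)).2.1.length ≤
          pvCnt G i vis + rest.length :=
        pvFoldA_measure G bs i u (pvAdj G u) (vis, rest, best) hsub
      simp only [List.length_cons] at hfuel
      have hdisp : w ≤ (List.foldl (pvStepA bs u) (vis, rest, best) (pvAdj G u)).2.2 ∨
          ∃ t ∈ (List.foldl (pvStepA bs u) (vis, rest, best) (pvAdj G u)).2.1,
            pvReach G bs (List.foldl (pvStepA bs u) (vis, rest, best) (pvAdj G u)).1 t w := by
        rcases List.mem_cons.1 hs with rfl | hsr
        · cases hr with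
          | single he hu =>
            obtain ⟨⟨p, hp⟩, hb⟩ := he
            exact pvFoldA_head G bs s (pvAdj G s) (vis, rest, best) w p w hp hb hu (Or.inl rfl)
          | @cons _ y _ he hu hr' =>
            obtain ⟨⟨p, hp⟩, hb⟩ := he
            exact pvFoldA_head G bs s (pvAdj G s) (vis, rest, best) y p w hp hb hu (Or.inr hr')
        · exact pvFoldA_transfer G bs u (pvAdj G u) (vis, rest, best) s w hsr hr
      rcases hdisp with h1 | ⟨t, htm, hre⟩
      · exact le_trans h1 (pvLoopA_best G bs fuel _ _ _)
      · exact ih _ _ _ (by omega) t htm hre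

theorem pvLoopA_sound (G : List (Int × List (Int × Int))) (bs : List (Int × Int))
    (fuel : Nat) (q : List Int) (vis : PySem.Dict Int Bool) (best : Int) :
    pvLoopA G bs fuel q vis best = best ∨
      ∃ s ∈ q, ∃ w, pvReach G bs vis s w ∧ pvLoopA G bs fuel q vis best = w := by
  induction fuel generalizing q vis best with
  | zero => exact Or.inl rfl
  | succ fuel ih =>
    cases q with
    | nil => exact Or.inl rfl
    | cons u rest =>
      simp only [pvLoopA]
      rcases ih (List.foldl (pvStepA bs u) (vis, rest, best) (pvAdj G u)).2.1
          (List.foldl (pvStepA bs u) (vis, rest, best) (pvAdj G u)).1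
          (List.foldl (pvStepA bs u) (vis, rest, best) (pvAdj G u)).2.2 with h1 | ⟨t, htm, w, hrw, heq⟩
      · rcases pvFoldA_bestSound G bs u (pvAdj G u) (vis, rest, best) with h2 | ⟨v, hunm, ⟨p, hp⟩, hnb, h2⟩
        · exact Or.inl (by rw [h1, h2])
        · exact Or.inr ⟨u, List.mem_cons_self, v,
            pvReach.single ⟨⟨p, hp⟩, hnb⟩ hunm, by rw [h1, h2]⟩
      · have hrw' : pvReach G bs vis t w :=
          pvReach_anti G bs vis _ (fun x hx => pvFoldA_unm G bs u (pvAdj G u) (vis, rest, best) x hx) hrw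
        rcases pvFoldA_qSound G bs u (pvAdj G u) (vis, rest, best) t htm with h2 | ⟨hunm, ⟨p, hp⟩, hnb⟩
        · exact Or.inr ⟨t, List.mem_cons_of_mem _ h2, w, hrw', heq⟩
        · exact Or.inr ⟨u, List.mem_cons_self, w, pvReach.cons ⟨⟨p, hp⟩, hnb⟩ hunm hrw', heq⟩

-- ---- B-side loop lemmas ----

theorem pvLoopB_best (G : List (Int × List (Int × Int))) (bs : List (Int × Int))
    (fuel : Nat) (fs : List (Int × Nat)) (vis : PySem.Dict Int Bool) (best : Int) :
    best ≤ pvLoopB G bs fuel fs vis best := by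
  induction fuel generalizing fs vis best with
  | zero => exact le_refl _
  | succ fuel ih =>
    cases fs with
    | nil => exact le_refl _
    | cons f0 fs =>
      obtain ⟨u, k⟩ := f0
      simp only [pvLoopB]
      by_cases hk : k < (pvAdj G u).length
      · rw [dif_pos hk]
        by_cases hc : vis.getD ((pvAdj G u)[k]).1 false = false ∧ (u, ((pvAdj G u)[k]).1) ∉ bs
        · rw [if_pos (by simpa using hc)]
          refine le_trans ?_ (ih _ _ _)
          split_ifs with h2 <;> omega
        · rw [if_neg (fun hb => hc (by simpa using hb))]
          exact ih _ _ _
      · rw [dif_neg hk]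
        exact ih _ _ _

theorem pvLoopB_complete (G : List (Int × List (Int × Int))) (bs : List (Int × Int)) (i : Int)
    (fuel : Nat) (fs : List (Int × Nat)) (vis : PySem.Dict Int Bool) (best : Int)
    (hfuel : pvMB G i vis fs < fuel) (f : Int × Nat) (hf : f ∈ fs) (w : Int)
    (hr : pvReachF G bs vis f.1 f.2 w) : w ≤ pvLoopB G bs fuel fs vis best := by
  induction fuel generalizing fs vis best f with
  | zero => exact absurd hfuel (Nat.not_lt_zero _)
  | succ fuel ih =>
    cases fs with
    | nil => simp at hf
    | cons f0 fs =>
      obtain ⟨u, k⟩ := f0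
      simp only [pvLoopB]
      by_cases hk : k < (pvAdj G u).length
      · rw [dif_pos hk]
        have hdk : (pvAdj G u).drop k = (pvAdj G u)[k] :: (pvAdj G u).drop (k+1) :=
          List.drop_eq_getElem_cons hk
        by_cases hc : vis.getD ((pvAdj G u)[k]).1 false = false ∧ (u, ((pvAdj G u)[k]).1) ∉ bs
        · rw [if_pos (by simpa using hc)]
          have hvnode : ((pvAdj G u)[k]).1 ∈ pvNodes G i :=
            pvAdj_sub G i u (List.getElem_mem hk)
          have hcnt : pvCnt G i (vis.insert ((pvAdj G u)[k]).1 true) + 1 ≤ pvCnt G i vis :=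
            pvCnt_insert_lt G i vis _ hvnode hc.1
          have hmul := Nat.mul_le_mul_right (pvW G + 1) hcnt
          rw [add_mul, one_mul] at hmul
          have hW : (pvAdj G ((pvAdj G u)[k]).1).length + 1 ≤ pvW G := by
            have := pvAdj_len G ((pvAdj G u)[k]).1
            unfold pvW
            omega
          have hmeas : pvMB G i (vis.insert ((pvAdj G u)[k]).1 true)
              ((((pvAdj G u)[k]).1, 0) :: (u, k + 1) :: fs) < fuel := by
            simp only [pvMB, pvWeight, List.map_cons, List.sum_cons] at hfuel ⊢
            omega
          have hbestV : ((pvAdj G u)[k]).1 ≤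
              pvLoopB G bs fuel ((((pvAdj G u)[k]).1, 0) :: (u, k + 1) :: fs)
                (vis.insert ((pvAdj G u)[k]).1 true)
                (if best < ((pvAdj G u)[k]).1 then ((pvAdj G u)[k]).1 else best) := by
            refine le_trans ?_ (pvLoopB_best G bs fuel _ _ _)
            split_ifs with h2 <;> omega
          rcases List.mem_cons.1 hf with heqf | hmemf
          · -- head frame (u, k)
            have hr2 : pvReachF G bs vis u k w := by rw [heqf] at hr; exact hr
            obtain ⟨x, p, hm, hb2, hx, hxw⟩ := hr2
            rw [hdk] at hm
            rcases List.mem_cons.1 hm with heq | hm2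
            · have hxV : x = ((pvAdj G u)[k]).1 := congrArg Prod.fst heq
              rcases hxw with h1 | h2
              · rw [← h1, hxV]; exact hbestV
              · rw [hxV] at h2
                rcases pvReach_split G bs vis ((pvAdj G u)[k]).1 hc.1 h2 with h3 | h4 | h5
                · rw [h3]; exact hbestV
                · exact ih _ _ _ hmeas (((pvAdj G u)[k]).1, 0) List.mem_cons_self
                    ((pvReachF_zero _ _ _ _ _).2 h4)
                · exact ih _ _ _ hmeas (((pvAdj G u)[k]).1, 0) List.mem_cons_self
                    ((pvReachF_zero _ _ _ _ _).2 h5)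
            · have hF : pvReachF G bs vis u (k+1) w := ⟨x, p, hm2, hb2, hx, hxw⟩
              rcases pvReachF_insert G bs vis ((pvAdj G u)[k]).1 hc.1 hF with h1 | h2 | h3
              · rw [h1]; exact hbestV
              · exact ih _ _ _ hmeas (u, k+1)
                  (List.mem_cons_of_mem _ List.mem_cons_self) h2
              · exact ih _ _ _ hmeas (((pvAdj G u)[k]).1, 0) List.mem_cons_self h3
          · rcases pvReachF_insert G bs vis ((pvAdj G u)[k]).1 hc.1 hr with h1 | h2 | h3
            · rw [h1]; exact hbestV
            · exact ih _ _ _ hmeas f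
                (List.mem_cons_of_mem _ (List.mem_cons_of_mem _ hmemf)) h2
            · exact ih _ _ _ hmeas (((pvAdj G u)[k]).1, 0) List.mem_cons_self h3
        · rw [if_neg (fun hb => hc (by simpa using hb))]
          have hmeas : pvMB G i vis ((u, k + 1) :: fs) < fuel := by
            simp only [pvMB, pvWeight, List.map_cons, List.sum_cons] at hfuel ⊢
            omega
          rcases List.mem_cons.1 hf with heqf | hmemf
          · have hr2 : pvReachF G bs vis u k w := by rw [heqf] at hr; exact hr
            obtain ⟨x, p, hm, hb2, hx, hxw⟩ := hr2
            rw [hdk] at hm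
            rcases List.mem_cons.1 hm with heq | hm2
            · have hxV : x = ((pvAdj G u)[k]).1 := congrArg Prod.fst heq
              exact absurd ⟨hxV ▸ hx, hxV ▸ hb2⟩ hc
            · exact ih _ _ _ hmeas (u, k+1) List.mem_cons_self ⟨x, p, hm2, hb2, hx, hxw⟩
          · exact ih _ _ _ hmeas f (List.mem_cons_of_mem _ hmemf) hr
      · rw [dif_neg hk]
        have hmeas : pvMB G i vis fs < fuel := by
          simp only [pvMB, pvWeight, List.map_cons, List.sum_cons] at hfuel ⊢
          omega
        rcases List.mem_cons.1 hf with heqf | hmemf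
        · have hr2 : pvReachF G bs vis u k w := by rw [heqf] at hr; exact hr
          obtain ⟨x, p, hm, _, _, _⟩ := hr2
          rw [List.drop_eq_nil_of_le (by omega)] at hm
          simp at hm
        · exact ih _ _ _ hmeas f hmemf hr

theorem pvLoopB_sound (G : List (Int × List (Int × Int))) (bs : List (Int × Int))
    (fuel : Nat) (fs : List (Int × Nat)) (vis : PySem.Dict Int Bool) (best : Int) :
    pvLoopB G bs fuel fs vis best = best ∨
      ∃ f ∈ fs, ∃ w, pvReachF G bs vis f.1 f.2 w ∧ pvLoopB G bs fuel fs vis best = w := by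
  induction fuel generalizing fs vis best with
  | zero => exact Or.inl rfl
  | succ fuel ih =>
    cases fs with
    | nil => exact Or.inl rfl
    | cons f0 fs =>
      obtain ⟨u, k⟩ := f0
      simp only [pvLoopB]
      by_cases hk : k < (pvAdj G u).length
      · rw [dif_pos hk]
        have hdk : (pvAdj G u).drop k = (pvAdj G u)[k] :: (pvAdj G u).drop (k+1) :=
          List.drop_eq_getElem_cons hk
        by_cases hc : vis.getD ((pvAdj G u)[k]).1 false = false ∧ (u, ((pvAdj G u)[k]).1) ∉ bs
        · rw [if_pos (by simpa using hc)]
          have hanti : ∀ x, pvUnm (vis.insert ((pvAdj G u)[k]).1 true) x → pvUnm vis x :=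
            fun x hx => ((pvUnm_insert _ _ _).1 hx).2
          rcases ih ((((pvAdj G u)[k]).1, 0) :: (u, k + 1) :: fs)
              (vis.insert ((pvAdj G u)[k]).1 true)
              (if best < ((pvAdj G u)[k]).1 then ((pvAdj G u)[k]).1 else best)
            with heq | ⟨f, hf, w, hrf, heq⟩
          · by_cases hlt : best < ((pvAdj G u)[k]).1
            · refine Or.inr ⟨(u, k), List.mem_cons_self, ((pvAdj G u)[k]).1,
                ⟨((pvAdj G u)[k]).1, ((pvAdj G u)[k]).2, by rw [hdk]; exact List.mem_cons_self, hc.2, hc.1,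
                  Or.inl rfl⟩, ?_⟩
              rw [heq, if_pos hlt]
            · refine Or.inl ?_
              rw [heq, if_neg hlt]
          · have hrf' := pvReachF_anti G bs vis _ hanti hrf
            rcases List.mem_cons.1 hf with hfe | hf2
            · have hrf2 : pvReachF G bs vis ((pvAdj G u)[k]).1 0 w := by
                rw [hfe] at hrf'; exact hrf'
              have hrw : pvReach G bs vis ((pvAdj G u)[k]).1 w :=
                (pvReachF_zero _ _ _ _ _).1 hrf2
              exact Or.inr ⟨(u, k), List.mem_cons_self, w,
                ⟨((pvAdj G u)[k]).1, ((pvAdj G u)[k]).2, by rw [hdk]; exact List.mem_cons_self, hc.2, hc.1,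
                  Or.inr hrw⟩, heq⟩
            · rcases List.mem_cons.1 hf2 with hfe2 | hf3
              · have hrf2 : pvReachF G bs vis u (k+1) w := by rw [hfe2] at hrf'; exact hrf'
                obtain ⟨x, p, hm, hb2, hx, hxw⟩ := hrf2
                exact Or.inr ⟨(u, k), List.mem_cons_self, w,
                  ⟨x, p, by rw [hdk]; exact List.mem_cons_of_mem _ hm, hb2, hx, hxw⟩, heq⟩
              · exact Or.inr ⟨f, List.mem_cons_of_mem _ hf3, w, hrf', heq⟩
        · rw [if_neg (fun hb => hc (by simpa using hb))]
          rcases ih ((u, k + 1) :: fs) vis best with heq | ⟨f, hf, w, hrf, heq⟩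
          · exact Or.inl heq
          · rcases List.mem_cons.1 hf with hfe | hf2
            · have hrf2 : pvReachF G bs vis u (k+1) w := by rw [hfe] at hrf; exact hrf
              obtain ⟨x, p, hm, hb2, hx, hxw⟩ := hrf2
              exact Or.inr ⟨(u, k), List.mem_cons_self, w,
                ⟨x, p, by rw [hdk]; exact List.mem_cons_of_mem _ hm, hb2, hx, hxw⟩, heq⟩
            · exact Or.inr ⟨f, List.mem_cons_of_mem _ hf2, w, hrf, heq⟩
      · rw [dif_neg hk]
        rcases ih fs vis best with heq | ⟨f, hf, w, hrf, heq⟩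
        · exact Or.inl heq
        · exact Or.inr ⟨f, List.mem_cons_of_mem _ hf, w, hrf, heq⟩

-- ---- final assembly ----

theorem pv_main (G : List (Int × List (Int × Int))) (vis : List (Int × Bool)) (i : Int)
    (bs : List (Int × Int)) : bfsAux G vis i bs = bfsAux_alt G vis i bs := by
  unfold bfsAux bfsAux_alt
  have hfA : pvCnt G i ((PySem.Dict.mk vis).insert i true) + ([i] : List Int).length <
      pvFuelA G i := by
    have h1 := pvCnt_le G i ((PySem.Dict.mk vis).insert i true)
    unfold pvFuelA
    simp only [List.length_cons, List.length_nil]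
    omega
  have hfB : pvMB G i ((PySem.Dict.mk vis).insert i true) [(i, 0)] < pvFuelB G i := by
    have h1 := pvCnt_le G i ((PySem.Dict.mk vis).insert i true)
    have h2 := pvAdj_len G i
    have hmul := Nat.mul_le_mul_right (pvW G + 1) h1
    have hdistr : ((pvNodes G i).length + 1) * (pvW G + 1) =
        (pvNodes G i).length * (pvW G + 1) + (pvW G + 1) := by ring
    simp only [pvMB, pvWeight, List.map_cons, List.sum_cons, List.map_nil, List.sum_nil]
    unfold pvFuelB
    unfold pvW at *
    omega
  have hAB : pvLoopA G bs (pvFuelA G i) [i] ((PySem.Dict.mk vis).insert i true) i ≤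
      pvLoopB G bs (pvFuelB G i) [(i, 0)] ((PySem.Dict.mk vis).insert i true) i := by
    rcases pvLoopA_sound G bs (pvFuelA G i) [i] ((PySem.Dict.mk vis).insert i true) i
      with h1 | ⟨s, hs, w, hr, heq⟩
    · rw [h1]; exact pvLoopB_best G bs _ _ _ _
    · rw [heq]
      have hsi : s = i := by simpa using hs
      rw [hsi] at hr
      exact pvLoopB_complete G bs i (pvFuelB G i) [(i, 0)]
        ((PySem.Dict.mk vis).insert i true) i hfB (i, 0) List.mem_cons_self w
        ((pvReachF_zero _ _ _ _ _).2 hr)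
  have hBA : pvLoopB G bs (pvFuelB G i) [(i, 0)] ((PySem.Dict.mk vis).insert i true) i ≤
      pvLoopA G bs (pvFuelA G i) [i] ((PySem.Dict.mk vis).insert i true) i := by
    rcases pvLoopB_sound G bs (pvFuelB G i) [(i, 0)] ((PySem.Dict.mk vis).insert i true) i
      with h1 | ⟨f, hf, w, hrf, heq⟩
    · rw [h1]; exact pvLoopA_best G bs _ _ _ _
    · rw [heq]
      have hfi : f = (i, 0) := by simpa using hf
      have hrf2 : pvReachF G bs ((PySem.Dict.mk vis).insert i true) i 0 w := by
        rw [hfi] at hrf; exact hrf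
      exact pvLoopA_complete G bs i (pvFuelA G i) [i]
        ((PySem.Dict.mk vis).insert i true) i hfA i List.mem_cons_self w
        ((pvReachF_zero _ _ _ _ _).1 hrf2)
  exact le_antisymm hAB hBA

-- ===== VERDICT (by name: the statement is the Claim_ definition above) =====
theorem bfsAux_spec : Claim_equal_bfsAux := by
  intro G vis i bridgesSet _ _
  unfold Spec_bfsAux
  exact pv_main G vis i bridgesSet
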